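-- pv_equiv track=rewrite | github.com/LostAsleep/aoc2021py | day02/d02.py | part_02_movement
-- ===== SOURCE A (Python) =====
-- def part_02_movement(direction_tuples:list) -> int:
--     """Move along the instruction according to part 2 instuctions."""
--
--     horizontal_position = 0
--     depth = 0
--     aim = 0
--     for instruction in direction_tuples:
--         if instruction[0] == "forward":
--             horizontal_position += instruction[1]
--             depth += (aim * instruction[1])
--         elif instruction[0] == "down":
--             aim += instruction[1]
--         elif instruction[0] == "up":
--             aim -= instruction[1]
--     return horizontal_position * depth
-- ===== SOURCE B (Python) =====
-- def part_02_movement(direction_tuples: list) -> int: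
--     """Two-pass: materialize the cumulative aim after each instruction,
--     then sum forward magnitudes and forward magnitude x aim separately."""
--     aims = []
--     a = 0
--     for d, m in direction_tuples:
--         if d == "down":
--             a += m
--         elif d == "up":
--             a -= m
--         aims.append(a)
--     horizontal = sum(m for (d, m) in direction_tuples if d == "forward")
--     depth = sum(m * aa for (d, m), aa in zip(direction_tuples, aims) if d == "forward")
--     return horizontal * depth
-- ===== Notes on version B (the rewrite author's own statement) =====
-- stated objective: alternative
-- what changed: Replaces A's single stateful loop over (horizontal, depth, aim) by two passes: one builds a materialized prefix list of cumulative aims, a second sums forward magnitudes and forward-magnitude-times-recorded-aim over the zipped table.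
import Mathlib
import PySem

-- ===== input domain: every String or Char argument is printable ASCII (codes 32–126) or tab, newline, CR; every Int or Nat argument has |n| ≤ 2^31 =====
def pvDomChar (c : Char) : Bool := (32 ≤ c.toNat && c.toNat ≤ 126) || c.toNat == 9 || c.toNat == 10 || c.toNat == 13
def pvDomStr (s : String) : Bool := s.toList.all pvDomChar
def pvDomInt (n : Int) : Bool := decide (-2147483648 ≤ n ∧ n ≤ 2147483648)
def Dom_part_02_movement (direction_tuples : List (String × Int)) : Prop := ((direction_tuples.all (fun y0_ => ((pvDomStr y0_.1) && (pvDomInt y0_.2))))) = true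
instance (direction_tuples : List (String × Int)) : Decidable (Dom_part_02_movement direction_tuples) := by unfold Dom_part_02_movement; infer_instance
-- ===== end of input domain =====

-- B replaces A's single stateful loop by two passes over a materialized prefix list
-- of cumulative aims (objective: alternative decomposition, same O(n) cost).

-- ===== PORT A =====
-- one loop over the state (horizontal_position, depth, aim)
def part_02_movement (direction_tuples : List (String × Int)) : Int :=
  let s := direction_tuples.foldl
    (fun (st : Int × Int × Int) instruction =>
      if instruction.1 == "forward" then
        (st.1 + instruction.2, st.2.1 + st.2.2 * instruction.2, st.2.2)
      else if instruction.1 == "down" then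
        (st.1, st.2.1, st.2.2 + instruction.2)
      else if instruction.1 == "up" then
        (st.1, st.2.1, st.2.2 - instruction.2)
      else st)
    (0, 0, 0)
  s.1 * s.2.1

-- ===== PORT B =====
-- first pass: the cumulative aim after each instruction, appended to a list
def pvAimsLoop (direction_tuples : List (String × Int)) : Int × List Int :=
  direction_tuples.foldl
    (fun (st : Int × List Int) p =>
      let a := if p.1 == "down" then st.1 + p.2
               else if p.1 == "up" then st.1 - p.2
               else st.1
      (a, st.2 ++ [a]))
    (0, [])

def part_02_movement_alt (direction_tuples : List (String × Int)) : Int :=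
  let aims := (pvAimsLoop direction_tuples).2
  let horizontal :=
    ((direction_tuples.filter (fun p => p.1 == "forward")).map (fun p => p.2)).sum
  let depth :=
    (((direction_tuples.zip aims).filter (fun q => q.1.1 == "forward")).map
      (fun q => q.1.2 * q.2)).sum
  horizontal * depth

-- ===== PRECONDITION & SPEC =====
def Spec_part_02_movement (direction_tuples : List (String × Int)) (out : Int) : Prop := out = part_02_movement_alt direction_tuples
instance (direction_tuples : List (String × Int)) (out : Int) : Decidable (Spec_part_02_movement direction_tuples out) := by unfold Spec_part_02_movement; infer_instance

-- ===== CLAIM (what is proved, stated in full; the proofs are below) =====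
def Claim_equal_part_02_movement : Prop := ∀ (direction_tuples : List (String × Int)), Dom_part_02_movement direction_tuples → Spec_part_02_movement direction_tuples (part_02_movement direction_tuples)

-- ===== LEMMAS AND PROOFS =====

-- reference recursion: the aims list starting from initial aim a
def refAims (a : Int) : List (String × Int) → List Int
  | [] => []
  | p :: ts =>
    let a' := if p.1 == "down" then a + p.2
              else if p.1 == "up" then a - p.2
              else a
    a' :: refAims a' ts

theorem pvAimsLoop_foldl (ts : List (String × Int)) (a : Int) (l : List Int) :
    ts.foldl
      (fun (st : Int × List Int) p =>
        let a := if p.1 == "down" then st.1 + p.2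
                 else if p.1 == "up" then st.1 - p.2
                 else st.1
        (a, st.2 ++ [a]))
      (a, l)
    = ((ts.foldl (fun x p => if p.1 == "down" then x + p.2
            else if p.1 == "up" then x - p.2 else x) a), l ++ refAims a ts) := by
  induction ts generalizing a l with
  | nil => simp [refAims]
  | cons p ts ih =>
    simp only [List.foldl_cons]
    rw [ih]
    simp [refAims]

-- the depth sum of B, over ts zipped with refAims a ts
def refDepth (a : Int) (ts : List (String × Int)) : Int :=
  (((ts.zip (refAims a ts)).filter (fun q => q.1.1 == "forward")).map
    (fun q => q.1.2 * q.2)).sum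

def refHoriz (ts : List (String × Int)) : Int :=
  ((ts.filter (fun p => p.1 == "forward")).map (fun p => p.2)).sum

theorem aLoop_char (ts : List (String × Int)) (h d a : Int) :
    ts.foldl
      (fun (st : Int × Int × Int) instruction =>
        if instruction.1 == "forward" then
          (st.1 + instruction.2, st.2.1 + st.2.2 * instruction.2, st.2.2)
        else if instruction.1 == "down" then
          (st.1, st.2.1, st.2.2 + instruction.2)
        else if instruction.1 == "up" then
          (st.1, st.2.1, st.2.2 - instruction.2)
        else st)
      (h, d, a)
    = (h + refHoriz ts, d + refDepth a ts,
       ts.foldl (fun x p => if p.1 == "down" then x + p.2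
            else if p.1 == "up" then x - p.2 else x) a) := by
  induction ts generalizing h d a with
  | nil => simp [refHoriz, refDepth, refAims]
  | cons p ts ih =>
    simp only [List.foldl_cons]
    by_cases hf : p.1 == "forward"
    · have hnd : (p.1 == "down") = false := by
        have := of_decide_eq_true hf; simp [this]
      have hnu : (p.1 == "up") = false := by
        have := of_decide_eq_true hf; simp [this]
      simp only [hf, hnd, hnu, if_true, Bool.false_eq_true, if_false, ih]
      simp only [refHoriz, refDepth, refAims, List.filter_cons, List.zip_cons_cons, hf, hnd,
        hnu, if_true, Bool.false_eq_true, if_false, List.map_cons, List.sum_cons, Prod.mk.injEq]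
      and_intros <;> first | ring | rfl | trivial
    · by_cases hd : p.1 == "down"
      · simp only [hf, hd, if_true, Bool.false_eq_true, if_false, ih]
        simp [refHoriz, refDepth, refAims, List.filter_cons, hf, hd]
      · by_cases hu : p.1 == "up"
        · simp only [hf, hd, hu, if_true, Bool.false_eq_true, if_false, ih]
          simp [refHoriz, refDepth, refAims, List.filter_cons, hf, hd, hu]
        · simp only [hf, hd, hu, Bool.false_eq_true, if_false, ih]
          simp [refHoriz, refDepth, refAims, List.filter_cons, hf, hd, hu]

-- ===== VERDICT (by name: the statement is the Claim_ definition above) =====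
theorem part_02_movement_spec : Claim_equal_part_02_movement := by
  intro ts _
  unfold Spec_part_02_movement part_02_movement part_02_movement_alt pvAimsLoop
  rw [aLoop_char, pvAimsLoop_foldl]
  simp [refHoriz, refDepth]
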